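-- pv_equiv track=rewrite | github.com/Emma-Leonhart/shrine-label-generator | tokiponizer.py | tokenize_romaji
-- ===== SOURCE A (Python) =====
-- BASE_MAP = {
--     "a": "a", "i": "i", "u": "u", "e": "e", "o": "o",
--     # Macron vowels (long vowels in romanization)
--     "ā": "a", "ī": "i", "ū": "u", "ē": "e", "ō": "o",
--
--     "ka": "ka", "ki": "ki", "ku": "ku", "ke": "ke", "ko": "ko",
--     "sa": "sa", "shi": "si", "su": "su", "se": "se", "so": "so",
--     "ta": "ta", "chi": "si", "tsu": "tu", "tu": "tu", "te": "te", "to": "to",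
--     "na": "na", "ni": "ni", "nu": "nu", "ne": "ne", "no": "no",
--     "ma": "ma", "mi": "mi", "mu": "mu", "me": "me", "mo": "mo",
--     "pa": "pa", "pi": "pi", "pu": "pu", "pe": "pe", "po": "po",
--     "ya": "ja", "yu": "ju", "yo": "jo",
--     "ra": "la", "ri": "li", "ru": "lu", "re": "le", "ro": "lo",
--     "wa": "wa", "wo": "wo",
--     "n": "n",
--
--     # Voiced consonants (mapped to their unvoiced Toki Pona equivalents)
--     "ga": "ka", "gi": "ki", "gu": "ku", "ge": "ke", "go": "ko",
--     "za": "sa", "ji": "si", "zu": "su", "ze": "se", "zo": "so",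
--     "da": "ta", "di": "si", "du": "tu", "de": "te", "do": "to",
--     "ba": "pa", "bi": "pi", "bu": "pu", "be": "pe", "bo": "po",
--
--     # H-consonants (will be processed positionally: word-initial→k, elsewhere→p)
--     "ha": "ha", "hi": "hi", "hu": "pu", "fu": "pu", "he": "he", "ho": "ho",
-- }
--
-- YOON_MAP = {
--     "kya": "kija", "kyu": "kiju", "kyo": "kijo",
--     "sha": "sija", "shu": "siju", "sho": "sijo",
--     "cha": "teja", "chu": "teju", "cho": "tejo",
--     "nya": "na",   "nyu": "niyu", "nyo": "no",
--     "hya": "kija", "hyu": "kiju", "hyo": "kijo",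
--     "mya": "mija", "myu": "miju", "myo": "mijo",
--     "rya": "liya", "ryu": "liyu", "ryo": "liyo",
--     "gya": "kija", "gyu": "kiju", "gyo": "kijo",
--     "ja":  "sija", "ju": "siju", "jo": "sijo",
--     "bya": "pija", "byu": "piju", "byo": "pijo",
--     "pya": "pija", "pyu": "piju", "pyo": "pijo",
--     "dya": "teja", "dyu": "teju", "dyo": "tejo",
-- }
--
-- def tokenize_romaji(text: str):
--     tokens = []
--     i = 0
--     while i < len(text):
--         for size in (3, 2, 1):
--             chunk = text[i:i+size]
--             if chunk in YOON_MAP or chunk in BASE_MAP: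
--                 tokens.append(chunk)
--                 i += size
--                 break
--         else:
--             i += 1
--     return tokens
-- ===== SOURCE B (Python) =====
-- # Greedy max-munch tokenizer re-done as a prefix-automaton scan over a single
-- # flat key set (the union of YOON_MAP's and BASE_MAP's keys, kept as one
-- # space-separated string): the scanner extends a candidate forward while the
-- # text is still a prefix of some key, remembering the longest full key seen,
-- # instead of probing slices of sizes 3, 2, 1 against two dicts.
--
-- _KEYS = frozenset(
--     "kya kyu kyo sha shu sho cha chu cho nya nyu nyo hya hyu hyo mya myu myo "
--     "rya ryu ryo gya gyu gyo ja ju jo bya byu byo pya pyu pyo dya dyu dyo "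
--     "a i u e o \u0101 \u012b \u016b \u0113 \u014d "
--     "ka ki ku ke ko sa shi su se so ta chi tsu tu te to na ni nu ne no "
--     "ma mi mu me mo pa pi pu pe po ya yu yo ra ri ru re ro wa wo n "
--     "ga gi gu ge go za ji zu ze zo da di du de do ba bi bu be bo "
--     "ha hi hu fu he ho".split()
-- )
--
-- _PREFIXES = frozenset(k[:j] for k in _KEYS for j in range(1, len(k) + 1))
--
--
-- def tokenize_romaji(text: str):
--     tokens = []
--     i, n = 0, len(text)
--     while i < n:
--         best = 0
--         j = i
--         while j < n and text[i:j+1] in _PREFIXES: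
--             j += 1
--             if text[i:j] in _KEYS:
--                 best = j - i
--         if best:
--             tokens.append(text[i:i+best])
--             i += best
--         else:
--             i += 1
--     return tokens
-- ===== Notes on version B (the rewrite author's own statement) =====
-- stated objective: alternative
-- what changed: Replaces the try-sizes-3-2-1 probing against two dicts with a prefix-automaton scan over one flat key set: a precomputed set of all key prefixes lets the scanner extend a match forward while the text is still a prefix of some key, recording the longest full key seen, so no fixed size list or downward retry exists.
import Mathlib
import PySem

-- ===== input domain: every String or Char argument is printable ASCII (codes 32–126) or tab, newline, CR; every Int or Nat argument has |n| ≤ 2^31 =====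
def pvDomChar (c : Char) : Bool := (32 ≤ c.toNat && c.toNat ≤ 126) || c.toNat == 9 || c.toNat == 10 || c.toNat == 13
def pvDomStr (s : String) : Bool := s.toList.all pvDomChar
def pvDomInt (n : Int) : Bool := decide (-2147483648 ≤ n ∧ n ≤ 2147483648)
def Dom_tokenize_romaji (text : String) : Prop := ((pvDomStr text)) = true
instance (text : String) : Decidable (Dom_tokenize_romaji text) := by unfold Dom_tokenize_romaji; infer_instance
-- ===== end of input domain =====

-- B replaces A's try-slice-sizes-3,2,1 probing of two dicts with a prefix-automaton scan over
-- one flat key set plus a precomputed set of key prefixes (objective: alternative; same output).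

-- ===== PORT A =====
def BASE_MAP : PySem.Dict String String := PySem.Dict.ofList [("a", "a"), ("i", "i"), ("u", "u"), ("e", "e"), ("o", "o"), ("ā", "a"), ("ī", "i"), ("ū", "u"), ("ē", "e"), ("ō", "o"), ("ka", "ka"), ("ki", "ki"), ("ku", "ku"), ("ke", "ke"), ("ko", "ko"), ("sa", "sa"), ("shi", "si"), ("su", "su"), ("se", "se"), ("so", "so"), ("ta", "ta"), ("chi", "si"), ("tsu", "tu"), ("tu", "tu"), ("te", "te"), ("to", "to"), ("na", "na"), ("ni", "ni"), ("nu", "nu"), ("ne", "ne"), ("no", "no"), ("ma", "ma"), ("mi", "mi"), ("mu", "mu"), ("me", "me"), ("mo", "mo"), ("pa", "pa"), ("pi", "pi"), ("pu", "pu"), ("pe", "pe"), ("po", "po"), ("ya", "ja"), ("yu", "ju"), ("yo", "jo"), ("ra", "la"), ("ri", "li"), ("ru", "lu"), ("re", "le"), ("ro", "lo"), ("wa", "wa"), ("wo", "wo"), ("n", "n"), ("ga", "ka"), ("gi", "ki"), ("gu", "ku"), ("ge", "ke"), ("go", "ko"), ("za", "sa"), ("ji", "si"), ("zu", "su"), ("ze",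 "se"), ("zo", "so"), ("da", "ta"), ("di", "si"), ("du", "tu"), ("de", "te"), ("do", "to"), ("ba", "pa"), ("bi", "pi"), ("bu", "pu"), ("be", "pe"), ("bo", "po"), ("ha", "ha"), ("hi", "hi"), ("hu", "pu"), ("fu", "pu"), ("he", "he"), ("ho", "ho")]

def YOON_MAP : PySem.Dict String String := PySem.Dict.ofList [("kya", "kija"), ("kyu", "kiju"), ("kyo", "kijo"), ("sha", "sija"), ("shu", "siju"), ("sho", "sijo"), ("cha", "teja"), ("chu", "teju"), ("cho", "tejo"), ("nya", "na"), ("nyu", "niyu"), ("nyo", "no"), ("hya", "kija"), ("hyu", "kiju"), ("hyo", "kijo"), ("mya", "mija"), ("myu", "miju"), ("myo", "mijo"), ("rya", "liya"), ("ryu", "liyu"), ("ryo", "liyo"), ("gya", "kija"), ("gyu", "kiju"), ("gyo", "kijo"), ("ja", "sija"), ("ju", "siju"), ("jo", "sijo"), ("bya", "pija"), ("byu", "piju"), ("byo", "pijo"), ("pya", "pija"), ("pyu", "piju"), ("pyo", "pijo"), ("dya", "teja"), ("dyu", "teju"), ("dyo", "tejo")]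

-- A's while loop: at position i try chunk sizes 3, 2, 1; on a hit append the chunk and
-- advance by the size, else advance by 1.  Structural recursion on the position.
def tokenizeA_go (cs : List Char) (i : Nat) : List String :=
  if _h : i < cs.length then
    let c3 := String.ofList (PySem.List.slice cs (some (i : Int)) (some ((i : Int) + 3)))
    if YOON_MAP.contains c3 || BASE_MAP.contains c3 then
      c3 :: tokenizeA_go cs (i + 3)
    else
      let c2 := String.ofList (PySem.List.slice cs (some (i : Int)) (some ((i : Int) + 2)))
      if YOON_MAP.contains c2 || BASE_MAP.contains c2 then
        c2 :: tokenizeA_go cs (i + 2)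
      else
        let c1 := String.ofList (PySem.List.slice cs (some (i : Int)) (some ((i : Int) + 1)))
        if YOON_MAP.contains c1 || BASE_MAP.contains c1 then
          c1 :: tokenizeA_go cs (i + 1)
        else
          tokenizeA_go cs (i + 1)
  else []
termination_by cs.length - i
decreasing_by all_goals omega

def tokenize_romaji (text : String) : List String := tokenizeA_go text.toList 0

-- ===== PORT B =====
-- _KEYS = frozenset("kya kyu … ho".split())  — one flat space-separated string of all keys
def KEYS_STR : String := "kya kyu kyo sha shu sho cha chu cho nya nyu nyo hya hyu hyo mya myu myo rya ryu ryo gya gyu gyo ja ju jo bya byu byo pya pyu pyo dya dyu dyo a i u e o ā ī ū ē ō ka ki ku ke ko sa shi su se so ta chi tsu tu te to na ni nu ne no ma mi mu me mo pa pi pu pe po ya yu yo ra ri ru re ro wa wo n ga gi gu ge go za ji zu ze zo da di du de do ba bi bu be bo ha hi hu fu he ho"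

def ALL_KEYS : PySem.Set String := PySem.Set.ofList (PySem.Str.split₀ KEYS_STR)

-- _PREFIXES = frozenset(k[:j] for k in _KEYS for j in range(1, len(k)+1))
def PREFIXES : PySem.Set String :=
  PySem.Set.ofList (ALL_KEYS.flatMap
    (fun k => (List.range k.toList.length).map (fun j => String.ofList (k.toList.take (j + 1)))))

-- inner while loop: extend j while text[i:j+1] is a key prefix, recording the longest key
def tokenizeB_inner (AK PF : PySem.Set String) (cs : List Char) (i j best : Nat) : Nat :=
  if h : j < cs.length ∧
      PySem.Set.contains PF
        (String.ofList (PySem.List.slice cs (some (i : Int)) (some ((j : Int) + 1)))) = true then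
    tokenizeB_inner AK PF cs i (j + 1)
      (if PySem.Set.contains AK
          (String.ofList (PySem.List.slice cs (some (i : Int)) (some ((j : Int) + 1)))) = true then
        j + 1 - i
      else best)
  else best
termination_by cs.length - j
decreasing_by omega

def tokenizeB_go (AK PF : PySem.Set String) (cs : List Char) (i : Nat) : List String :=
  if _h : i < cs.length then
    let best := tokenizeB_inner AK PF cs i i 0
    if _hb : 0 < best then
      String.ofList (PySem.List.slice cs (some (i : Int)) (some ((i : Int) + (best : Int)))) ::
        tokenizeB_go AK PF cs (i + best)
    else
      tokenizeB_go AK PF cs (i + 1)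
  else []
termination_by cs.length - i
decreasing_by all_goals omega

def tokenize_romaji_alt (text : String) : List String := tokenizeB_go ALL_KEYS PREFIXES text.toList 0

-- ===== PRECONDITION & SPEC =====
def Spec_tokenize_romaji (text : String) (out : List String) : Prop := out = tokenize_romaji_alt text
instance (text : String) (out : List String) : Decidable (Spec_tokenize_romaji text out) := by unfold Spec_tokenize_romaji; infer_instance

-- ===== CLAIM (what is proved, stated in full; the proofs are below) =====
def Claim_equal_tokenize_romaji : Prop := ∀ (text : String), Dom_tokenize_romaji text → Spec_tokenize_romaji text (tokenize_romaji text)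

-- ===== LEMMAS AND PROOFS =====

-- B's flat key list is exactly A's YOON keys followed by A's BASE keys
set_option maxRecDepth 100000 in
lemma all_keys_eq : ALL_KEYS = YOON_MAP.keys ++ BASE_MAP.keys := by decide

-- ALL_KEYS membership is exactly A's pair of dict-membership tests
lemma contains_ALL_KEYS (s : String) :
    PySem.Set.contains ALL_KEYS s = (YOON_MAP.contains s || BASE_MAP.contains s) := by
  have h : PySem.Set.contains ALL_KEYS s = true ↔
      (YOON_MAP.contains s || BASE_MAP.contains s) = true := by
    rw [PySem.Set.contains_iff, all_keys_eq, List.mem_append]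
    simp only [Bool.or_eq_true]
    rw [PySem.Dict.contains_iff_mem_keys, PySem.Dict.contains_iff_mem_keys]
  exact Bool.eq_iff_iff.mpr h

-- PREFIXES with ALL_KEYS rewritten to A's explicit key lists (for fast kernel evaluation)
def PREFIXES2 : PySem.Set String :=
  PySem.Set.ofList ((YOON_MAP.keys ++ BASE_MAP.keys).flatMap
    (fun k => (List.range k.toList.length).map (fun j => String.ofList (k.toList.take (j + 1)))))

lemma prefixes_eq : PREFIXES = PREFIXES2 := by
  unfold PREFIXES PREFIXES2; rw [all_keys_eq]

-- every key has length ≤ 3 and all of its non-empty prefixes (including itself) are in PREFIXES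
set_option maxRecDepth 100000 in
lemma keys_closed : ∀ s ∈ YOON_MAP.keys ++ BASE_MAP.keys,
    PySem.Set.contains PREFIXES2 (String.ofList (s.toList.take 1)) = true ∧
    PySem.Set.contains PREFIXES2 (String.ofList (s.toList.take 2)) = true ∧
    PySem.Set.contains PREFIXES2 s = true ∧ s.toList.length ≤ 3 := by decide

lemma key_facts (s : String) (h : PySem.Set.contains ALL_KEYS s = true) :
    PySem.Set.contains PREFIXES (String.ofList (s.toList.take 1)) = true ∧
    PySem.Set.contains PREFIXES (String.ofList (s.toList.take 2)) = true ∧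
    PySem.Set.contains PREFIXES s = true ∧ s.toList.length ≤ 3 := by
  rw [prefixes_eq]
  apply keys_closed
  rw [PySem.Set.contains_iff, all_keys_eq] at h
  exact h

-- every element of PREFIXES has length ≤ 3
lemma prefixes_short : ∀ s : String, PySem.Set.contains PREFIXES s = true → s.toList.length ≤ 3 := by
  intro s h
  rw [prefixes_eq, PySem.Set.contains_iff] at h
  unfold PREFIXES2 at h
  rw [PySem.Set.mem_ofList] at h
  simp only [List.mem_flatMap, List.mem_map, List.mem_range] at h
  obtain ⟨k, hk, j, hj, rfl⟩ := h
  have hk3 := (keys_closed k hk).2.2.2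
  simp only [String.toList_ofList, List.length_take]
  omega



-- a slice starting at i with upper bound i + m is take m of drop i
lemma sliceAt (cs : List Char) (i : Nat) (m : Nat) (b : Int) (hb : b = (i : Int) + (m : Int)) :
    PySem.List.slice cs (some (i : Int)) (some b) = (cs.drop i).take m := by
  subst hb; exact PySem.List.slice_natCast_add cs i m

lemma inner_stop (AK PF : PySem.Set String) (cs : List Char) (i j best : Nat)
    (h : ¬(j < cs.length ∧
      PySem.Set.contains PF
        (String.ofList (PySem.List.slice cs (some (i : Int)) (some ((j : Int) + 1)))) = true)) :
    tokenizeB_inner AK PF cs i j best = best := by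
  rw [tokenizeB_inner, dif_neg h]

lemma inner_step (AK PF : PySem.Set String) (cs : List Char) (i j best : Nat)
    (h : j < cs.length ∧
      PySem.Set.contains PF
        (String.ofList (PySem.List.slice cs (some (i : Int)) (some ((j : Int) + 1)))) = true) :
    tokenizeB_inner AK PF cs i j best =
      tokenizeB_inner AK PF cs i (j + 1)
        (if PySem.Set.contains AK
            (String.ofList (PySem.List.slice cs (some (i : Int)) (some ((j : Int) + 1)))) = true then
          j + 1 - i
        else best) := by
  rw [tokenizeB_inner, dif_pos h]

lemma take_all_eq (cs : List Char) (i m p : Nat) (h1 : cs.length ≤ i + m) (h2 : m ≤ p) :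
    (cs.drop i).take p = (cs.drop i).take m := by
  rw [List.take_of_length_le (by simp; omega), List.take_of_length_le (by simp; omega)]

set_option maxRecDepth 10000 in
set_option maxHeartbeats 2000000 in
lemma go_eq (AK PF : PySem.Set String)
    (hc : ∀ s, PySem.Set.contains AK s = (YOON_MAP.contains s || BASE_MAP.contains s))
    (hkf : ∀ s : String, PySem.Set.contains AK s = true →
      PySem.Set.contains PF (String.ofList (s.toList.take 1)) = true ∧
      PySem.Set.contains PF (String.ofList (s.toList.take 2)) = true ∧
      PySem.Set.contains PF s = true ∧ s.toList.length ≤ 3)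
    (hps : ∀ s : String, PySem.Set.contains PF s = true → s.toList.length ≤ 3)
    (cs : List Char) : ∀ k i, cs.length - i ≤ k → tokenizeA_go cs i = tokenizeB_go AK PF cs i := by
  intro k
  induction k with
  | zero =>
      intro i hi
      have h : ¬ i < cs.length := by omega
      rw [tokenizeA_go, tokenizeB_go, dif_neg h, dif_neg h]
  | succ k ih =>
      intro i hi
      by_cases hl : i < cs.length
      case neg => rw [tokenizeA_go, tokenizeB_go, dif_neg hl, dif_neg hl]
      case pos =>
      rw [tokenizeA_go, tokenizeB_go]
      simp only [dif_pos hl]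
      rw [sliceAt cs i 3 _ (by push_cast; ring), sliceAt cs i 2 _ (by push_cast; ring),
          sliceAt cs i 1 _ (by push_cast; ring)]
      simp only [← hc]
      by_cases cp1 : PySem.Set.contains PF (String.ofList ((cs.drop i).take 1)) = true
      case neg =>
        have hb : tokenizeB_inner AK PF cs i i 0 = 0 :=
          inner_stop AK PF cs i i 0 (by
            rw [sliceAt cs i 1 _ (by push_cast; ring)]
            exact fun hc => cp1 hc.2)
        have k3f : ¬ PySem.Set.contains AK (String.ofList ((cs.drop i).take 3)) = true := by
          intro hc
          have h1 := (hkf _ hc).1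
          rw [String.toList_ofList, List.take_take, show min 1 3 = 1 from rfl] at h1
          exact cp1 h1
        have k2f : ¬ PySem.Set.contains AK (String.ofList ((cs.drop i).take 2)) = true := by
          intro hc
          have h1 := (hkf _ hc).1
          rw [String.toList_ofList, List.take_take, show min 1 2 = 1 from rfl] at h1
          exact cp1 h1
        have k1f : ¬ PySem.Set.contains AK (String.ofList ((cs.drop i).take 1)) = true :=
          fun hc => cp1 (hkf _ hc).2.2.1
        rw [hb, if_neg k3f, if_neg k2f, if_neg k1f, dif_neg (by omega : ¬ (0:Nat) < 0)]
        exact ih (i + 1) (by omega)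
      case pos =>
        have hi1 : i + 1 - i = 1 := by omega
        have st1 : tokenizeB_inner AK PF cs i i 0 = tokenizeB_inner AK PF cs i (i + 1)
            (if PySem.Set.contains AK (String.ofList ((cs.drop i).take 1)) = true
             then 1 else 0) := by
          rw [inner_step AK PF cs i i 0 (by rw [sliceAt cs i 1 _ (by push_cast; ring)]; exact ⟨hl, cp1⟩)]
          rw [sliceAt cs i 1 _ (by push_cast; ring), hi1]
        by_cases hl2 : i + 1 < cs.length
        case neg =>
          -- only one character left: all three chunks are the same string
          have e3 : (cs.drop i).take 3 = (cs.drop i).take 1 := take_all_eq cs i 1 3 (by omega) (by omega)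
          have e2 : (cs.drop i).take 2 = (cs.drop i).take 1 := take_all_eq cs i 1 2 (by omega) (by omega)
          have hb : tokenizeB_inner AK PF cs i i 0 =
              (if PySem.Set.contains AK (String.ofList ((cs.drop i).take 1)) = true
               then 1 else 0) := by
            rw [st1]; exact inner_stop AK PF cs i (i + 1) _ (fun hc => hl2 hc.1)
          by_cases hk1 : PySem.Set.contains AK (String.ofList ((cs.drop i).take 1)) = true
          · have hbv : tokenizeB_inner AK PF cs i i 0 = 1 := by rw [hb, if_pos hk1]
            rw [hbv, e3, if_pos hk1, dif_pos (by omega : (0:Nat) < 1)]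
            rw [sliceAt cs i 1 _ (by push_cast; ring)]
            congr 1
            rw [tokenizeA_go, tokenizeB_go, dif_neg (by omega : ¬ i + 3 < cs.length),
              dif_neg (by omega : ¬ i + 1 < cs.length)]
          · have hbv : tokenizeB_inner AK PF cs i i 0 = 0 := by rw [hb, if_neg hk1]
            rw [hbv, e3, e2, if_neg hk1, if_neg hk1, if_neg hk1,
              dif_neg (by omega : ¬ (0:Nat) < 0)]
            exact ih (i + 1) (by omega)
        case pos =>
          by_cases cp2 : PySem.Set.contains PF (String.ofList ((cs.drop i).take 2)) = true
          case neg =>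
            have hb : tokenizeB_inner AK PF cs i i 0 =
                (if PySem.Set.contains AK (String.ofList ((cs.drop i).take 1)) = true
                 then 1 else 0) := by
              rw [st1]
              exact inner_stop AK PF cs i (i + 1) _ (by
                rw [sliceAt cs i 2 _ (by push_cast; ring)]
                exact fun hc => cp2 hc.2)
            have k3f : ¬ PySem.Set.contains AK (String.ofList ((cs.drop i).take 3)) = true := by
              intro hc
              have h1 := (hkf _ hc).2.1
              rw [String.toList_ofList, List.take_take, show min 2 3 = 2 from rfl] at h1
              exact cp2 h1
            have k2f : ¬ PySem.Set.contains AK (String.ofList ((cs.drop i).take 2)) = true :=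
              fun hc => cp2 (hkf _ hc).2.2.1
            by_cases hk1 : PySem.Set.contains AK (String.ofList ((cs.drop i).take 1)) = true
            · have hbv : tokenizeB_inner AK PF cs i i 0 = 1 := by rw [hb, if_pos hk1]
              rw [hbv, if_neg k3f, if_neg k2f, if_pos hk1,
                dif_pos (by omega : (0:Nat) < 1)]
              rw [sliceAt cs i 1 _ (by push_cast; ring)]
              congr 1
              exact ih (i + 1) (by omega)
            · have hbv : tokenizeB_inner AK PF cs i i 0 = 0 := by rw [hb, if_neg hk1]
              rw [hbv, if_neg k3f, if_neg k2f, if_neg hk1,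
                dif_neg (by omega : ¬ (0:Nat) < 0)]
              exact ih (i + 1) (by omega)
          case pos =>
            have hi2 : i + 1 + 1 - i = 2 := by omega
            have st2 : ∀ b1 : Nat, tokenizeB_inner AK PF cs i (i + 1) b1 = tokenizeB_inner AK PF cs i (i + 2)
                (if PySem.Set.contains AK (String.ofList ((cs.drop i).take 2)) = true
                 then 2 else b1) := by
              intro b1
              rw [inner_step AK PF cs i (i + 1) b1 (by
                rw [sliceAt cs i 2 _ (by push_cast; ring)]; exact ⟨hl2, cp2⟩)]
              rw [sliceAt cs i 2 _ (by push_cast; ring), hi2]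
            by_cases hl3 : i + 2 < cs.length
            case neg =>
              -- exactly two characters left: chunk of size 3 equals chunk of size 2
              have e3 : (cs.drop i).take 3 = (cs.drop i).take 2 := take_all_eq cs i 2 3 (by omega) (by omega)
              have hb : ∀ b1 : Nat, tokenizeB_inner AK PF cs i (i + 1) b1 =
                  (if PySem.Set.contains AK (String.ofList ((cs.drop i).take 2)) = true
                   then 2 else b1) := by
                intro b1
                rw [st2]; exact inner_stop AK PF cs i (i + 2) _ (fun hc => hl3 hc.1)
              by_cases hk2 : PySem.Set.contains AK (String.ofList ((cs.drop i).take 2)) = true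
              · have hbv : tokenizeB_inner AK PF cs i i 0 = 2 := by
                  rw [st1, hb, if_pos hk2]
                rw [hbv, e3, if_pos hk2, dif_pos (by omega : (0:Nat) < 2)]
                rw [sliceAt cs i 2 _ (by push_cast; ring)]
                congr 1
                rw [tokenizeA_go, tokenizeB_go, dif_neg (by omega : ¬ i + 3 < cs.length),
                  dif_neg (by omega : ¬ i + 2 < cs.length)]
              · by_cases hk1 : PySem.Set.contains AK (String.ofList ((cs.drop i).take 1)) = true
                · have hbv : tokenizeB_inner AK PF cs i i 0 = 1 := by
                    rw [st1, hb, if_pos hk1, if_neg hk2]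
                  rw [hbv, e3, if_neg hk2, if_neg hk2, if_pos hk1, dif_pos (by omega : (0:Nat) < 1)]
                  rw [sliceAt cs i 1 _ (by push_cast; ring)]
                  congr 1
                  exact ih (i + 1) (by omega)
                · have hbv : tokenizeB_inner AK PF cs i i 0 = 0 := by
                    rw [st1, hb, if_neg hk1, if_neg hk2]
                  rw [hbv, e3, if_neg hk2, if_neg hk2, if_neg hk1,
                    dif_neg (by omega : ¬ (0:Nat) < 0)]
                  exact ih (i + 1) (by omega)
            case pos =>
              by_cases cp3 : PySem.Set.contains PF (String.ofList ((cs.drop i).take 3)) = true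
              case neg =>
                have hb : ∀ b1 : Nat, tokenizeB_inner AK PF cs i (i + 1) b1 =
                    (if PySem.Set.contains AK (String.ofList ((cs.drop i).take 2)) = true
                     then 2 else b1) := by
                  intro b1
                  rw [st2]
                  exact inner_stop AK PF cs i (i + 2) _ (by
                    rw [sliceAt cs i 3 _ (by push_cast; ring)]
                    exact fun hc => cp3 hc.2)
                have k3f : ¬ PySem.Set.contains AK (String.ofList ((cs.drop i).take 3)) = true :=
                  fun hc => cp3 (hkf _ hc).2.2.1
                by_cases hk2 : PySem.Set.contains AK (String.ofList ((cs.drop i).take 2)) = true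
                · have hbv : tokenizeB_inner AK PF cs i i 0 = 2 := by
                    rw [st1, hb, if_pos hk2]
                  rw [hbv, if_neg k3f, if_pos hk2, dif_pos (by omega : (0:Nat) < 2)]
                  rw [sliceAt cs i 2 _ (by push_cast; ring)]
                  congr 1
                  exact ih (i + 2) (by omega)
                · by_cases hk1 : PySem.Set.contains AK (String.ofList ((cs.drop i).take 1)) = true
                  · have hbv : tokenizeB_inner AK PF cs i i 0 = 1 := by
                      rw [st1, hb, if_pos hk1, if_neg hk2]
                    rw [hbv, if_neg k3f, if_neg hk2, if_pos hk1, dif_pos (by omega : (0:Nat) < 1)]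
                    rw [sliceAt cs i 1 _ (by push_cast; ring)]
                    congr 1
                    exact ih (i + 1) (by omega)
                  · have hbv : tokenizeB_inner AK PF cs i i 0 = 0 := by
                      rw [st1, hb, if_neg hk1, if_neg hk2]
                    rw [hbv, if_neg k3f, if_neg hk2, if_neg hk1,
                      dif_neg (by omega : ¬ (0:Nat) < 0)]
                    exact ih (i + 1) (by omega)
              case pos =>
                have hi3 : i + 2 + 1 - i = 3 := by omega
                have st3 : ∀ b2 : Nat, tokenizeB_inner AK PF cs i (i + 2) b2 = tokenizeB_inner AK PF cs i (i + 3)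
                    (if PySem.Set.contains AK (String.ofList ((cs.drop i).take 3)) = true
                     then 3 else b2) := by
                  intro b2
                  rw [inner_step AK PF cs i (i + 2) b2 (by
                    rw [sliceAt cs i 3 _ (by push_cast; ring)]; exact ⟨hl3, cp3⟩)]
                  rw [sliceAt cs i 3 _ (by push_cast; ring), hi3]
                have st4 : ∀ b3 : Nat, tokenizeB_inner AK PF cs i (i + 3) b3 = b3 := by
                  intro b3
                  apply inner_stop
                  rw [sliceAt cs i 4 _ (by push_cast; ring)]
                  rintro ⟨h4, hp⟩
                  have hlen := hps _ hp
                  rw [String.toList_ofList] at hlen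
                  simp only [List.length_take, List.length_drop] at hlen
                  omega
                by_cases hk3 : PySem.Set.contains AK (String.ofList ((cs.drop i).take 3)) = true
                · have hbv : tokenizeB_inner AK PF cs i i 0 = 3 := by
                    rw [st1, st2, st3, st4, if_pos hk3]
                  rw [hbv, if_pos hk3, dif_pos (by omega : (0:Nat) < 3)]
                  rw [sliceAt cs i 3 _ (by push_cast; ring)]
                  congr 1
                  exact ih (i + 3) (by omega)
                · by_cases hk2 : PySem.Set.contains AK (String.ofList ((cs.drop i).take 2)) = true
                  · have hbv : tokenizeB_inner AK PF cs i i 0 = 2 := by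
                      rw [st1, st2, st3, st4, if_neg hk3, if_pos hk2]
                    rw [hbv, if_neg hk3, if_pos hk2, dif_pos (by omega : (0:Nat) < 2)]
                    rw [sliceAt cs i 2 _ (by push_cast; ring)]
                    congr 1
                    exact ih (i + 2) (by omega)
                  · by_cases hk1 : PySem.Set.contains AK (String.ofList ((cs.drop i).take 1)) = true
                    · have hbv : tokenizeB_inner AK PF cs i i 0 = 1 := by
                        rw [st1, st2, st3, st4, if_neg hk3, if_neg hk2, if_pos hk1]
                      rw [hbv, if_neg hk3, if_neg hk2, if_pos hk1, dif_pos (by omega : (0:Nat) < 1)]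
                      rw [sliceAt cs i 1 _ (by push_cast; ring)]
                      congr 1
                      exact ih (i + 1) (by omega)
                    · have hbv : tokenizeB_inner AK PF cs i i 0 = 0 := by
                        rw [st1, st2, st3, st4, if_neg hk3, if_neg hk2, if_neg hk1]
                      rw [hbv, if_neg hk3, if_neg hk2, if_neg hk1,
                        dif_neg (by omega : ¬ (0:Nat) < 0)]
                      exact ih (i + 1) (by omega)


-- ===== VERDICT (by name: the statement is the Claim_ definition above) =====
theorem tokenize_romaji_spec : Claim_equal_tokenize_romaji := by
  intro text _
  unfold Spec_tokenize_romaji tokenize_romaji tokenize_romaji_alt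
  exact go_eq ALL_KEYS PREFIXES contains_ALL_KEYS key_facts prefixes_short
    text.toList text.toList.length 0 (by omega)
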